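-- pv_equiv track=rewrite | github.com/GizawAAiT/Codeforces | A_Stone_Game.py | solve
-- ===== SOURCE A (Python) =====
-- def solve(n, nums):
--     _min, _max, index_min, index_max = nums[0], nums[0], 0, 0
--
--     for idx in range(n):
--         if nums[idx] < _min:
--             _min = nums[idx]
--             index_min = idx
--
--         if nums[idx] > _max:
--             _max = nums[idx]
--             index_max = idx
--
--     l, r = min(index_max, index_min), max(index_max, index_min)
--
--     return min(r + 1, n - l, l + 1 + (n-r))
-- ===== SOURCE B (Python) =====
-- def solve(n, nums):
--     # Selection by stable sorting: the head of the index list sorted ascending by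
--     # value is the first argmin; sorted with reverse=True (stable, ties keep
--     # original order) gives the first argmax.  An empty selection defaults to
--     # index 0 (the seed index).
--     order = sorted(range(n), key=nums.__getitem__)
--     index_min = order[0] if order else 0
--     order_rev = sorted(range(n), key=nums.__getitem__, reverse=True)
--     index_max = order_rev[0] if order_rev else 0
--     l, r = min(index_max, index_min), max(index_max, index_min)
--     return min(r + 1, n - l, l + 1 + (n - r))
-- ===== Notes on version B (the rewrite author's own statement) =====
-- stated objective: alternative
-- what changed: B replaces A's fused min/max-tracking scan by selection via stable sorting: it sorts the index list by value (ascending and, for the max, with reverse=True) and takes the head of each sorted list (defaulting to index 0 when the selection is empty), relying on sort stability for A's first-occurrence tie-breaking.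
import Mathlib
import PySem

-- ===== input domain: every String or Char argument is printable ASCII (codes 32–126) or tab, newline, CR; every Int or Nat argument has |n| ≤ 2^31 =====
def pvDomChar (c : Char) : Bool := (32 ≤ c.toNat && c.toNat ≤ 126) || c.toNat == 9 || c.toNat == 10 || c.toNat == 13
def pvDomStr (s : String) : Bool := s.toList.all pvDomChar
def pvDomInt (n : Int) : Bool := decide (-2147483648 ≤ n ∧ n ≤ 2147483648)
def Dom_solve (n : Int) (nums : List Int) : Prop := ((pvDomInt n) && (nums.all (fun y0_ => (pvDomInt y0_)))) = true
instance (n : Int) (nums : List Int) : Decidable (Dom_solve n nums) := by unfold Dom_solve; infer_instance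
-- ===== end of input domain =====

-- B replaces A's fused min/max-tracking scan by selection via stable sorting of the
-- index list (a different algorithm of similar size; equal return value proved below).

-- ===== PORT A =====
def solve (n : Int) (nums : List Int) : Int :=
  -- _min, _max, index_min, index_max = nums[0], nums[0], 0, 0
  let first : Int := (PySem.List.pyGet? nums 0).getD 0
  -- for idx in range(n): two sequenced ifs updating (_min, index_min) and (_max, index_max)
  let st : Int × Int × Int × Int :=
    (PySem.List.pyRange 0 n 1).foldl
      (fun (st : Int × Int × Int × Int) idx =>
        let v := PySem.List.pyGetD nums idx 0
        let st1 := if v < st.1 then (v, st.2.1, idx, st.2.2.2) else st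
        if v > st1.2.1 then (st1.1, v, st1.2.2.1, idx) else st1)
      (first, first, 0, 0)
  let l := min st.2.2.2 st.2.2.1
  let r := max st.2.2.2 st.2.2.1
  min (r + 1) (min (n - l) (l + 1 + (n - r)))

-- ===== PORT B =====
def solve_alt (n : Int) (nums : List Int) : Int :=
  -- order = sorted(range(n), key=nums.__getitem__); index_min = order[0] if order else 0
  let key : Int → Int := fun k => PySem.List.pyGetD nums k 0
  let order := PySem.List.sorted (PySem.List.pyRange 0 n 1) key false
  let indexMin := if order = [] then 0 else PySem.List.pyGetD order 0 0
  -- order_rev = sorted(range(n), key=nums.__getitem__, reverse=True); index_max = order_rev[0] if order_rev else 0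
  let orderRev := PySem.List.sorted (PySem.List.pyRange 0 n 1) key true
  let indexMax := if orderRev = [] then 0 else PySem.List.pyGetD orderRev 0 0
  let l := min indexMax indexMin
  let r := max indexMax indexMin
  min (r + 1) (min (n - l) (l + 1 + (n - r)))

-- ===== PRECONDITION & SPEC =====
-- Pre_ excludes exactly the inputs where the Python A raises IndexError:
-- nums[0] on the empty list, and nums[idx] for idx < n when n > len(nums).
def Pre_solve (n : Int) (nums : List Int) : Prop :=
  nums ≠ [] ∧ n ≤ (nums.length : Int)
instance (n : Int) (nums : List Int) : Decidable (Pre_solve n nums) := by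
  unfold Pre_solve; infer_instance
def pvWitness_solve : Int × List Int := (3, [5, 1, 4])

def Spec_solve (n : Int) (nums : List Int) (out : Int) : Prop := out = solve_alt n nums
instance (n : Int) (nums : List Int) (out : Int) : Decidable (Spec_solve n nums out) := by unfold Spec_solve; infer_instance

-- ===== CLAIM (what is proved, stated in full; the proofs are below) =====
def Claim_equal_solve : Prop := ∀ (n : Int) (nums : List Int), Dom_solve n nums → Pre_solve n nums → Spec_solve n nums (solve n nums)

-- ===== LEMMAS AND PROOFS =====

-- A's 4-tuple fold splits into independent (min,value) and (max,value) folds.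
theorem foldA_decomp (key : Int → Int) :
    ∀ (R : List Int) (st : Int × Int × Int × Int),
    R.foldl
      (fun (st : Int × Int × Int × Int) idx =>
        let v := key idx
        let st1 := if v < st.1 then (v, st.2.1, idx, st.2.2.2) else st
        if v > st1.2.1 then (st1.1, v, st1.2.2.1, idx) else st1)
      st
    = ((R.foldl (fun (p : Int × Int) k => if key k < p.1 then (key k, k) else p) (st.1, st.2.2.1)).1,
       (R.foldl (fun (p : Int × Int) k => if p.1 < key k then (key k, k) else p) (st.2.1, st.2.2.2)).1,
       (R.foldl (fun (p : Int × Int) k => if key k < p.1 then (key k, k) else p) (st.1, st.2.2.1)).2,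
       (R.foldl (fun (p : Int × Int) k => if p.1 < key k then (key k, k) else p) (st.2.1, st.2.2.2)).2) := by
  intro R
  induction R with
  | nil => intro st; rfl
  | cons k R ih =>
    intro st
    obtain ⟨mn, mx, imin, imax⟩ := st
    simp only [List.foldl_cons]
    rw [ih]
    by_cases h1 : key k < mn <;> by_cases h2 : mx < key k <;>
      simp [h1, h2, gt_iff_lt]

-- A's running-(value,index) min fold computes min?'s first-extremal element and its key.
theorem minfold (key : Int → Int) :
    ∀ (R : List Int) (i : Int),
    R.foldl (fun (p : Int × Int) k => if key k < p.1 then (key k, k) else p) (key i, i)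
    = (key (PySem.List.minD (i :: R) key 0), PySem.List.minD (i :: R) key 0) := by
  intro R
  induction R with
  | nil => intro i; rfl
  | cons k R ih =>
    intro i
    have h2 : PySem.List.minD (i :: k :: R) key 0
        = if key k < key i then PySem.List.minD (k :: R) key 0
          else PySem.List.minD (i :: R) key 0 := by
      by_cases h : key k < key i <;>
        simp [PySem.List.minD, PySem.List.min?, h]
    rw [h2]
    simp only [List.foldl_cons]
    by_cases h : key k < key i
    · simp only [h, if_pos]; exact ih k
    · simp only [h, if_neg, not_false_iff]; exact ih i

theorem maxfold (key : Int → Int) :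
    ∀ (R : List Int) (i : Int),
    R.foldl (fun (p : Int × Int) k => if p.1 < key k then (key k, k) else p) (key i, i)
    = (key (PySem.List.maxD (i :: R) key 0), PySem.List.maxD (i :: R) key 0) := by
  intro R
  induction R with
  | nil => intro i; rfl
  | cons k R ih =>
    intro i
    have h2 : PySem.List.maxD (i :: k :: R) key 0
        = if key i < key k then PySem.List.maxD (k :: R) key 0
          else PySem.List.maxD (i :: R) key 0 := by
      by_cases h : key i < key k <;>
        simp [PySem.List.maxD, PySem.List.max?, h]
    rw [h2]
    simp only [List.foldl_cons]
    by_cases h : key i < key k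
    · simp only [h, if_pos]; exact ih k
    · simp only [h, if_neg, not_false_iff]; exact ih i

-- the accumulator steps of Python's min?/max? folds, named so they can be cited.
def minStep (key : Int → Int) (o : Option Int) (x : Int) : Option Int :=
  match o with
  | none => some x
  | some m => if key x < key m then some x else some m

def maxStep (key : Int → Int) (o : Option Int) (x : Int) : Option Int :=
  match o with
  | none => some x
  | some m => if key m < key x then some x else some m

theorem min?_eq_foldl_minStep (key : Int → Int) (xs : List Int) :
    PySem.List.min? xs key = xs.foldl (minStep key) none := by
  unfold PySem.List.min?
  congr 1
  funext o x
  cases o <;> rfl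

theorem max?_eq_foldl_maxStep (key : Int → Int) (xs : List Int) :
    PySem.List.max? xs key = xs.foldl (maxStep key) none := by
  unfold PySem.List.max?
  congr 1
  funext o x
  cases o <;> rfl

-- head of a stable ascending insertion: the incoming element wins only strictly.
theorem head_insertBy_lt (key : Int → Int) (x : Int) (acc : List Int) :
    (PySem.List.insertBy (fun a b => decide (key a < key b)) x acc).head?
      = minStep key acc.head? x := by
  cases acc with
  | nil => rfl
  | cons y ys =>
    by_cases h : key x < key y <;> simp [PySem.List.insertBy, minStep, h]

theorem head_insertBy_gt (key : Int → Int) (x : Int) (acc : List Int) :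
    (PySem.List.insertBy (fun a b => decide (key b < key a)) x acc).head?
      = maxStep key acc.head? x := by
  cases acc with
  | nil => rfl
  | cons y ys =>
    by_cases h : key y < key x <;> simp [PySem.List.insertBy, maxStep, h]

-- head of the stable ascending sort = Python's first-extremal min(..., key=...).
theorem head_sorted_min (key : Int → Int) :
    ∀ (xs : List Int) (acc : List Int),
    (xs.foldl (fun acc x => PySem.List.insertBy (fun a b => decide (key a < key b)) x acc) acc).head?
      = xs.foldl (minStep key) acc.head? := by
  intro xs
  induction xs with
  | nil => intro acc; rfl
  | cons x xs ih =>
    intro acc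
    simp only [List.foldl_cons]
    rw [ih, head_insertBy_lt]

theorem head_sorted_max (key : Int → Int) :
    ∀ (xs : List Int) (acc : List Int),
    (xs.foldl (fun acc x => PySem.List.insertBy (fun a b => decide (key b < key a)) x acc) acc).head?
      = xs.foldl (maxStep key) acc.head? := by
  intro xs
  induction xs with
  | nil => intro acc; rfl
  | cons x xs ih =>
    intro acc
    simp only [List.foldl_cons]
    rw [ih, head_insertBy_gt]

theorem sorted_head_eq_minD (key : Int → Int) (xs : List Int) :
    (PySem.List.sorted xs key false).getD 0 0 = PySem.List.minD xs key 0 := by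
  have h : (PySem.List.sorted xs key false).head? = PySem.List.min? xs key := by
    rw [PySem.List.sorted_eq_foldl_insertBy, min?_eq_foldl_minStep]
    exact head_sorted_min key xs []
  rw [PySem.List.minD, ← h]
  cases PySem.List.sorted xs key false <;> rfl

theorem sorted_head_eq_maxD (key : Int → Int) (xs : List Int) :
    (PySem.List.sorted xs key true).getD 0 0 = PySem.List.maxD xs key 0 := by
  have h : (PySem.List.sorted xs key true).head? = PySem.List.max? xs key := by
    rw [max?_eq_foldl_maxStep]
    show (xs.foldl (fun acc x => PySem.List.insertBy (fun a b => decide (key b < key a)) x acc) []).head? = _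
    exact head_sorted_max key xs []
  rw [PySem.List.maxD, ← h]
  cases PySem.List.sorted xs key true <;> rfl

-- ===== VERDICT (by name: the statement is the Claim_ definition above) =====
theorem solve_spec : Claim_equal_solve := by
  intro n nums _ hpre
  obtain ⟨hne, hnlen⟩ := hpre
  unfold Spec_solve solve solve_alt
  set key : Int → Int := fun k => PySem.List.pyGetD nums k 0 with hkey
  by_cases hn : (0 : Int) < n
  · obtain ⟨R, hR⟩ : ∃ R, PySem.List.pyRange 0 n 1 = 0 :: R :=
      ⟨PySem.List.pyRange 1 n 1, PySem.List.pyRange_one_cons hn⟩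
    have hfirst : (PySem.List.pyGet? nums 0).getD 0 = key 0 := rfl
    have hmin : PySem.List.sorted (0 :: R) key false ≠ [] := by
      simp [PySem.List.sorted_eq_nil_iff]
    have hmax : PySem.List.sorted (0 :: R) key true ≠ [] := by
      simp [PySem.List.sorted_eq_nil_iff]
    simp only [hfirst, hR, hmin, hmax, if_neg, not_false_iff, PySem.List.pyGetD_zero]
    rw [foldA_decomp key (0 :: R)]
    simp only [List.foldl_cons, lt_irrefl, if_neg, not_false_iff]
    rw [minfold key R 0, maxfold key R 0,
      sorted_head_eq_minD key (0 :: R), sorted_head_eq_maxD key (0 :: R)]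
  · -- n ≤ 0: range(n) is empty, both sides use index 0 on both ends
    have hnil : PySem.List.pyRange 0 n 1 = [] :=
      PySem.List.pyRange_one_eq_nil (by omega)
    simp [hnil, PySem.List.sorted]
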